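-- pv_equiv track=rewrite | github.com/lalebdi/PythonAlgos | uniqueCharsInStr.py | unique2
-- ===== SOURCE A (Python) =====
-- def unique2(s):
--     s = s.replace(" ", "")
--     characters = set()
--
--     for letter in s:
--         if letter in characters:
--             return False
--         else:
--             characters.add(letter)
--     return True
-- ===== SOURCE B (Python) =====
-- def unique2(s):
--     t = sorted(s.replace(" ", ""))
--     return all(a != b for a, b in zip(t, t[1:]))
-- ===== Notes on version B (the rewrite author's own statement) =====
-- stated objective: alternative
-- what changed: Instead of scanning with a hash set and early-returning on a repeat, B sorts the space-stripped characters and checks that no two adjacent characters of the sorted list are equal.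
import Mathlib
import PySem

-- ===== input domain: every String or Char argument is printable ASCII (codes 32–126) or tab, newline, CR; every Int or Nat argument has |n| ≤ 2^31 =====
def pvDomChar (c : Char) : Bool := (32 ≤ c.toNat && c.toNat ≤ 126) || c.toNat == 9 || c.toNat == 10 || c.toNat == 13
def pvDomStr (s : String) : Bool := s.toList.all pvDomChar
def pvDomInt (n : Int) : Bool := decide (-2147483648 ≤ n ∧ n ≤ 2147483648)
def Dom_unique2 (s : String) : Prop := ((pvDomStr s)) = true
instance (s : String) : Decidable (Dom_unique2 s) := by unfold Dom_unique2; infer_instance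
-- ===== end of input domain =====

-- B replaces A's incremental seen-set scan with early return by sorting the
-- space-stripped characters and checking that no two adjacent sorted characters are equal.

-- ===== PORT A =====
-- for letter in s: if letter in characters: return False; else characters.add(letter); return True
def unique2Loop : List Char → PySem.Set Char → Bool
  | [], _ => true
  | c :: cs, seen =>
    if PySem.Set.contains seen c then false
    else unique2Loop cs (PySem.Set.add seen c)

def unique2 (s : String) : Bool :=
  unique2Loop (PySem.Str.replace s " " "").toList PySem.Set.empty

-- ===== PORT B =====
-- t = sorted(s.replace(" ", "")); all(a != b for a, b in zip(t, t[1:]))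
def unique2_alt (s : String) : Bool :=
  let t := PySem.List.sorted (PySem.Str.replace s " " "").toList (fun c => c) false
  (t.zip (t.drop 1)).all (fun p => !(p.1 == p.2))

-- ===== PRECONDITION & SPEC =====
def Spec_unique2 (s : String) (out : Bool) : Prop := out = unique2_alt s
instance (s : String) (out : Bool) : Decidable (Spec_unique2 s out) := by unfold Spec_unique2; infer_instance

-- ===== CLAIM (what is proved, stated in full; the proofs are below) =====
def Claim_equal_unique2 : Prop := ∀ (s : String), Dom_unique2 s → Spec_unique2 s (unique2 s)

-- ===== LEMMAS AND PROOFS =====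

-- A's loop returns true exactly when the remaining list is duplicate-free and disjoint from seen
theorem unique2Loop_iff (l : List Char) (seen : PySem.Set Char) :
    unique2Loop l seen = true ↔ l.Nodup ∧ ∀ c ∈ l, c ∉ seen := by
  induction l generalizing seen with
  | nil => simp [unique2Loop]
  | cons c cs ih =>
      simp only [unique2Loop]
      by_cases h : c ∈ seen
      · rw [if_pos ((PySem.Set.contains_iff seen c).mpr h)]
        constructor
        · intro hf; cases hf
        · rintro ⟨_, hdisj⟩
          exact absurd h (hdisj c (by simp))
      · rw [if_neg (fun hc => h ((PySem.Set.contains_iff seen c).mp hc))]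
        rw [ih]
        constructor
        · rintro ⟨hnd, hdisj⟩
          refine ⟨List.nodup_cons.mpr ⟨fun hm => ?_, hnd⟩, ?_⟩
          · exact hdisj c hm ((PySem.Set.mem_add seen c c).mpr (Or.inr rfl))
          · rintro d (_ | hd)
            · exact h
            · intro hds
              exact hdisj d (by assumption) ((PySem.Set.mem_add seen c d).mpr (Or.inl hds))
        · rintro ⟨hnd, hdisj⟩
          rcases List.nodup_cons.mp hnd with ⟨hc, hcs⟩
          refine ⟨hcs, fun d hd hds => ?_⟩
          rcases (PySem.Set.mem_add seen c d).mp hds with hs | rfl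
          · exact hdisj d (.tail _ hd) hs
          · exact hc hd

-- adjacent all-different on zip with tail ↔ IsChain (· ≠ ·)
theorem zip_tail_all_ne_iff (t : List Char) :
    ((t.zip (t.drop 1)).all (fun p => !(p.1 == p.2)) = true) ↔ t.IsChain (· ≠ ·) := by
  induction t with
  | nil => simp
  | cons a t ih =>
      cases t with
      | nil => simp
      | cons b t =>
          simp only [List.drop_succ_cons, List.drop_zero, List.zip_cons_cons, List.all_cons,
            Bool.and_eq_true, List.isChain_cons_cons, List.drop_one, List.tail_cons] at *
          rw [← ih]
          simp

-- on a ≤-sorted list, no equal adjacent pair ↔ no duplicates at all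
theorem isChain_ne_iff_nodup_of_pairwise_le (t : List Char)
    (hs : t.Pairwise (· ≤ ·)) : t.IsChain (· ≠ ·) ↔ t.Nodup := by
  constructor
  · intro hne
    have hlt : t.IsChain (· < ·) := by
      have hle : t.IsChain (· ≤ ·) := hs.isChain
      clear hs
      induction t with
      | nil => exact List.IsChain.nil
      | cons a t ih =>
          cases t with
          | nil => exact List.isChain_singleton ..
          | cons b t =>
              rw [List.isChain_cons_cons] at *
              exact ⟨lt_of_le_of_ne hle.1 hne.1, ih hne.2 hle.2⟩
    exact ((List.isChain_iff_pairwise).mp hlt).imp (fun h => ne_of_lt h)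
  · intro hnd
    have hlt : t.Pairwise (· < ·) := by
      exact (hs.and hnd).imp (fun h => lt_of_le_of_ne h.1 h.2)
    exact ((List.isChain_iff_pairwise).mpr hlt).imp (fun _ _ h => ne_of_lt h)

-- ===== VERDICT (by name: the statement is the Claim_ definition above) =====
theorem unique2_spec : Claim_equal_unique2 := by
  intro s _
  unfold Spec_unique2 unique2 unique2_alt
  set l := (PySem.Str.replace s " " "").toList with hl
  set t := PySem.List.sorted l (fun c => c) false with ht
  have hperm : t.Perm l := PySem.List.sorted_perm l (fun c => c) false
  have hpw : t.Pairwise (· ≤ ·) := by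
    simpa using PySem.List.sorted_pairwise (xs := l) (key := fun c => c)
  rw [Bool.eq_iff_iff, unique2Loop_iff, zip_tail_all_ne_iff,
      isChain_ne_iff_nodup_of_pairwise_le t hpw, hperm.nodup_iff]
  simp [PySem.Set.empty]
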